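-- pv_equiv track=rewrite | github.com/ChristinaROK/TIC | 20210428.py | solution
-- ===== SOURCE A (Python) =====
-- def solution(answers):
--     length = len(answers)
--     a = [i for i in range(1,6)]
--     b = [2,1,2,3,2,4,2,5]
--     c = [3,3,1,1,2,2,4,4,5,5]
--     list_func = lambda x : x*(length//len(x)) + x[:length%len(x)]
--
--     res = [0,0,0]
--     for ans, a, b, c in zip(answers, list_func(a), list_func(b), list_func(c)):
--         abc = [a,b,c]
--         for i in range(3):
--             res[i] += int(ans == abc[i])
--
--     answer = []
--     v = 0
--     for i, x in enumerate(res):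
--         if v < x:
--             v = x
--             answer = [i+1]
--         elif v == x:
--             answer.append(i+1)
--
--     return answer
-- ===== SOURCE B (Python) =====
-- def solution(answers):
--     # Histogram algorithm: one pass builds a table keyed by (index mod 40, answer)
--     # (40 = lcm of the three pattern cycle lengths 5, 8, 10); each student's score
--     # is then read off the table without rescanning the answers.
--     hist = {}
--     for i, ans in enumerate(answers):
--         k = (i % 40, ans)
--         hist[k] = hist.get(k, 0) + 1
--     patterns = [[1, 2, 3, 4, 5], [2, 1, 2, 3, 2, 4, 2, 5], [3, 3, 1, 1, 2, 2, 4, 4, 5, 5]]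
--     scores = [sum(hist.get((r, p[r % len(p)]), 0) for r in range(40)) for p in patterns]
--     m = max(scores)
--     return [j + 1 for j, s in enumerate(scores) if s == m]
-- ===== Notes on version B (the rewrite author's own statement) =====
-- stated objective: alternative
-- what changed: B builds a histogram keyed by (index mod 40, answer) in one pass (40 = lcm of the pattern cycle lengths) and reads each pattern's score off the table in 40 lookups, then selects winners by max-then-filter, instead of A's zip scan over three pre-materialized tiled pattern lists with a running-max tie scan.
import Mathlib
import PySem

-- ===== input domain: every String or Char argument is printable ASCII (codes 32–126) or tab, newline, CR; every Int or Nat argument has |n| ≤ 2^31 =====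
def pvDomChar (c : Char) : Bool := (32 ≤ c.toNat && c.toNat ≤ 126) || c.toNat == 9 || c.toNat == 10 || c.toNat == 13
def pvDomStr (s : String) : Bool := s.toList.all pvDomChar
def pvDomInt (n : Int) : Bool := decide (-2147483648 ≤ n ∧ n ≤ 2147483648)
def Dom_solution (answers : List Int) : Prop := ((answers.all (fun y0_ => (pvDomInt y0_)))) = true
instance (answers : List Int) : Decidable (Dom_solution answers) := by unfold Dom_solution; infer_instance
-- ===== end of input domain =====

-- B replaces A's tiled-pattern zip scan by a histogram keyed by (index mod 40, answer)
-- built in one pass, from which each pattern's score is read off in 40 lookups: one dict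
-- update per answer instead of three comparisons over pre-materialized tiled lists
-- (an alternative algorithm of the same O(n) cost).

-- ===== PORT A =====
-- int(ans == x)
def pvDelta (ans x : Int) : Int := if ans = x then 1 else 0

-- list_func: x*(length//len(x)) + x[:length%len(x)]; length = len(answers) ≥ 0 and len(x) > 0,
-- so Python's // and % coincide with Nat division/mod here (exact on this domain).
def pvExt (x : List Int) (n : Nat) : List Int :=
  (List.replicate (n / x.length) x).flatten ++ x.take (n % x.length)

-- the zip loop: res[i] += int(ans == abc[i]) for the three patterns simultaneously
def pvLoopA : List Int → List Int → List Int → List Int → Int × Int × Int → Int × Int × Int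
  | ans :: rest, x :: xs, y :: ys, z :: zs, (r1, r2, r3) =>
      pvLoopA rest xs ys zs (r1 + pvDelta ans x, r2 + pvDelta ans y, r3 + pvDelta ans z)
  | _, _, _, _, r => r

-- the selection loop: running max v with reset-on-greater, append-on-equal
def pvSelA : List (Int × Int) → Int → List Int → List Int
  | [], _, answer => answer
  | (i, x) :: rest, v, answer =>
      if v < x then pvSelA rest x [i + 1]
      else if v = x then pvSelA rest v (answer ++ [i + 1])
      else pvSelA rest v answer

def solution (answers : List Int) : List Int :=
  let length := answers.length
  let a : List Int := [1, 2, 3, 4, 5]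
  let b : List Int := [2, 1, 2, 3, 2, 4, 2, 5]
  let c : List Int := [3, 3, 1, 1, 2, 2, 4, 4, 5, 5]
  let res := pvLoopA answers (pvExt a length) (pvExt b length) (pvExt c length) (0, 0, 0)
  pvSelA (PySem.List.enumerate [res.1, res.2.1, res.2.2] 0) 0 []

-- ===== PORT B =====
-- hist[k] = hist.get(k, 0) + 1 over enumerate(answers), key k = (i % 40, ans)
def pvHistB (answers : List Int) : PySem.Dict (Int × Int) Int :=
  (PySem.List.enumerate answers 0).foldl
    (fun d q => d.insert (PySem.Int.mod q.1 40, q.2) (d.getD (PySem.Int.mod q.1 40, q.2) 0 + 1))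
    PySem.Dict.empty

-- sum(hist.get((r, p[r % len(p)]), 0) for r in range(40)); p[r % len(p)] is in range,
-- so pyGetD is exact here
def pvScoreB (hist : PySem.Dict (Int × Int) Int) (p : List Int) : Int :=
  ((PySem.List.pyRange 0 40 1).map
    (fun r => hist.getD (r, PySem.List.pyGetD p (PySem.Int.mod r (p.length : Int)) 0) 0)).sum

def solution_alt (answers : List Int) : List Int :=
  let hist := pvHistB answers
  let patterns : List (List Int) :=
    [[1, 2, 3, 4, 5], [2, 1, 2, 3, 2, 4, 2, 5], [3, 3, 1, 1, 2, 2, 4, 4, 5, 5]]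
  let scores := patterns.map (pvScoreB hist)
  -- max(scores): scores has three entries, so max? is some
  let m := (PySem.List.max? scores (fun s => s)).getD 0
  ((PySem.List.enumerate scores 0).filter (fun js => js.2 == m)).map (fun js => js.1 + 1)

-- ===== PRECONDITION & SPEC =====
def Spec_solution (answers : List Int) (out : List Int) : Prop := out = solution_alt answers
instance (answers : List Int) (out : List Int) : Decidable (Spec_solution answers out) := by unfold Spec_solution; infer_instance

-- ===== CLAIM (what is proved, stated in full; the proofs are below) =====
def Claim_equal_solution : Prop := ∀ (answers : List Int), Dom_solution answers → Spec_solution answers (solution answers)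

-- ===== LEMMAS AND PROOFS =====

def pvPa : List Int := [1, 2, 3, 4, 5]
def pvPb : List Int := [2, 1, 2, 3, 2, 4, 2, 5]
def pvPc : List Int := [3, 3, 1, 1, 2, 2, 4, 4, 5, 5]

-- the "stream" view of the repeated pattern: entry j is p[(i+j) % |p|]
def pvExtS (p : List Int) : Nat → Nat → List Int
  | _, 0 => []
  | i, m + 1 => p.getD (i % p.length) 0 :: pvExtS p (i + 1) m

-- match count of l against pattern p cycled from offset i
def pvCnt (p : List Int) : Nat → List Int → Int
  | _, [] => 0
  | i, x :: l => (if x = p.getD (i % p.length) 0 then 1 else 0) + pvCnt p (i + 1) l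

-- the key stream B histograms: ((i+j) % 40, l_j)
def pvKeyed : List Int → Nat → List (Int × Int)
  | [], _ => []
  | x :: l, i => (((i % 40 : Nat) : Int), x) :: pvKeyed l (i + 1)

theorem pvExtS_mod (p : List Int) : ∀ (m i : Nat), pvExtS p (i + p.length) m = pvExtS p i m := by
  intro m
  induction m with
  | zero => intro i; rfl
  | succ m ih =>
      intro i
      simp only [pvExtS, Nat.add_mod_right]
      refine congrArg _ ?_
      have : i + p.length + 1 = (i + 1) + p.length := by omega
      rw [this, ih]

theorem pvExtS_take (p : List Int) : ∀ (m i : Nat), i + m ≤ p.length →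
    pvExtS p i m = (p.drop i).take m := by
  intro m
  induction m with
  | zero => intro i _; rfl
  | succ m ih =>
      intro i h
      have hi : i < p.length := by omega
      rw [List.drop_eq_getElem_cons hi]
      simp only [pvExtS, Nat.mod_eq_of_lt hi, List.take_succ_cons,
        List.getD_eq_getElem p 0 hi]
      exact congrArg _ (ih (i + 1) (by omega))

theorem pvExtS_append (p : List Int) : ∀ (a b i : Nat),
    pvExtS p i (a + b) = pvExtS p i a ++ pvExtS p (i + a) b := by
  intro a
  induction a with
  | zero => intro b i; simp [pvExtS]
  | succ a ih =>
      intro b i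
      have h1 : a + 1 + b = (a + b) + 1 := by omega
      have h2 : i + (a + 1) = (i + 1) + a := by omega
      rw [h1, h2]
      simp only [pvExtS, List.cons_append, ih b (i + 1)]

theorem pvExt_eq (p : List Int) (hp : p ≠ []) : ∀ (n : Nat), pvExt p n = pvExtS p 0 n := by
  intro n
  induction n using Nat.strong_induction_on with
  | _ n ih =>
    have hl : 0 < p.length := List.length_pos_iff.mpr hp
    by_cases h : n < p.length
    · rw [pvExt, Nat.div_eq_of_lt h, Nat.mod_eq_of_lt h,
        pvExtS_take p n 0 (by omega)]
      simp
    · have hm : n = p.length + (n - p.length) := by omega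
      set m := n - p.length with hmdef
      rw [hm, pvExtS_append p p.length m 0]
      have e1 : pvExtS p 0 p.length = p := by
        rw [pvExtS_take p p.length 0 (by omega)]; simp
      have e2 : pvExtS p (0 + p.length) m = pvExtS p 0 m := pvExtS_mod p m 0
      rw [e1, e2, ← ih m (by omega)]
      rw [pvExt, pvExt]
      have d1 : (p.length + m) / p.length = m / p.length + 1 := by
        rw [Nat.add_comm, Nat.add_div_right _ hl]
      have d2 : (p.length + m) % p.length = m % p.length := by
        rw [Nat.add_comm, Nat.add_mod_right]
      rw [d1, d2, List.replicate_succ, List.flatten_cons, List.append_assoc]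

-- A's zip loop over the three streams = the three cycled match counts
theorem pvLoopA_eq : ∀ (l : List Int) (i : Nat) (s1 s2 s3 : Int),
    pvLoopA l (pvExtS pvPa i l.length) (pvExtS pvPb i l.length) (pvExtS pvPc i l.length)
        (s1, s2, s3)
      = (s1 + pvCnt pvPa i l, s2 + pvCnt pvPb i l, s3 + pvCnt pvPc i l) := by
  intro l
  induction l with
  | nil => intro i s1 s2 s3; simp [pvLoopA, pvCnt]
  | cons x rest ih =>
      intro i s1 s2 s3
      simp only [List.length_cons, pvExtS, pvLoopA, pvCnt, pvDelta, ih (i + 1)]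
      refine congrArg₂ _ (by ring) (congrArg₂ _ (by ring) (by ring))

theorem pvCnt_nonneg (p : List Int) : ∀ (i : Nat) (l : List Int), 0 ≤ pvCnt p i l := by
  intro i l
  induction l generalizing i with
  | nil => simp [pvCnt]
  | cons x rest ih =>
      have := ih (i + 1)
      simp only [pvCnt]
      split_ifs <;> omega

-- the sum over a fixed residue list of counts in a keyed list
def pvSum (R : List Int) (t : Int → Int) (K : List (Int × Int)) : Int :=
  (R.map (fun r => ((K.count (r, t r)) : Int))).sum

theorem pvSum_nil (R : List Int) (t : Int → Int) : pvSum R t [] = 0 := by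
  simp [pvSum]

theorem pvSum_cons (R : List Int) (t : Int → Int) (a : Int × Int) (K : List (Int × Int)) :
    pvSum R t (a :: K)
      = pvSum R t K + ((R.filter (fun r => (r, t r) == a)).length : Int) := by
  induction R with
  | nil => simp [pvSum]
  | cons r R ih =>
      simp only [pvSum, List.map_cons, List.sum_cons] at ih ⊢
      rw [List.count_cons, List.filter_cons, ih]
      simp only [beq_iff_eq]
      by_cases h : (r, t r) = a
      · rw [if_pos h.symm, if_pos h, List.length_cons]; push_cast; ring
      · rw [if_neg (fun hh => h hh.symm), if_neg h]; push_cast; ring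

theorem pvFilterLen (R : List Int) (hN : R.Nodup) (t : Int → Int) (m x : Int) (hm : m ∈ R) :
    ((R.filter (fun r => (r, t r) == (m, x))).length : Int)
      = if x = t m then 1 else 0 := by
  by_cases h : x = t m
  · have hc : ∀ r ∈ R, ((r, t r) == (m, x)) = (r == m) := by
      intro r _
      by_cases hr : r = m
      · subst hr; simp [h]
      · simp [Prod.ext_iff, hr]
    rw [List.filter_congr hc, ← List.countP_eq_length_filter]
    have : List.countP (fun r => r == m) R = List.count m R := rfl
    rw [this, List.count_eq_one_of_mem hN hm]
    simp [h]
  · have hc : R.filter (fun r => (r, t r) == (m, x)) = [] := by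
      rw [List.filter_eq_nil_iff]
      intro r _
      simp only [beq_iff_eq, Prod.ext_iff]
      rintro ⟨rfl, hx⟩
      exact h hx.symm
    simp [hc, h]

-- the central fact: B's 40-residue histogram sum = the cycled match count
theorem pvSum_keyed (p : List Int) (hdvd : p.length ∣ 40) :
    ∀ (l : List Int) (i : Nat),
    pvSum (PySem.List.pyRange 0 40 1)
        (fun r => PySem.List.pyGetD p (PySem.Int.mod r (p.length : Int)) 0)
        (pvKeyed l i)
      = pvCnt p i l := by
  intro l
  induction l with
  | nil => intro i; simp [pvKeyed, pvSum_nil, pvCnt]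
  | cons x rest ih =>
      intro i
      rw [pvKeyed, pvSum_cons, ih (i + 1)]
      have hm : ((i % 40 : Nat) : Int) ∈ PySem.List.pyRange 0 40 1 := by
        rw [PySem.List.mem_pyRange_one]
        have := Nat.mod_lt i (show 0 < 40 by omega)
        omega
      rw [pvFilterLen _ (PySem.List.nodup_pyRange_one 0 40) _ _ x hm]
      have ht : PySem.List.pyGetD p (PySem.Int.mod ((i % 40 : Nat) : Int) (p.length : Int)) 0
          = p.getD (i % p.length) 0 := by
        rw [PySem.Int.mod_natCast, PySem.List.pyGetD_natCast,
          Nat.mod_mod_of_dvd i hdvd]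
      rw [ht, pvCnt]
      omega

-- B's enumerate-and-mod key stream is pvKeyed
theorem pvEnumMap : ∀ (l : List Int) (n : Nat),
    (PySem.List.enumerate l ((n : Nat) : Int)).map
        (fun q => (PySem.Int.mod q.1 40, q.2))
      = pvKeyed l n := by
  intro l
  induction l with
  | nil => intro n; simp [PySem.List.enumerate_nil, pvKeyed]
  | cons x rest ih =>
      intro n
      rw [PySem.List.enumerate_cons, List.map_cons, pvKeyed]
      have h40 : (40 : Int) = ((40 : Nat) : Int) := rfl
      have hkey : PySem.Int.mod ((n : Nat) : Int) 40 = ((n % 40 : Nat) : Int) := by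
        rw [h40, PySem.Int.mod_natCast]
      have hnext : ((n : Nat) : Int) + 1 = (((n + 1 : Nat)) : Int) := by push_cast; ring
      rw [hkey, hnext, ih (n + 1)]

-- B's histogram is the counter of the key stream
theorem pvHist_eq (answers : List Int) :
    pvHistB answers = PySem.Dict.counter (pvKeyed answers 0) := by
  rw [pvHistB, ← pvEnumMap answers 0,
    ← PySem.Dict.foldl_insert_getD_add_one_eq_counter, List.foldl_map]
  simp

-- B's per-pattern score = the cycled match count
theorem pvScoreB_eq (answers p : List Int) (hdvd : p.length ∣ 40) :
    pvScoreB (pvHistB answers) p = pvCnt p 0 answers := by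
  rw [pvScoreB, pvHist_eq]
  have : ((PySem.List.pyRange 0 40 1).map
      (fun r => (PySem.Dict.counter (pvKeyed answers 0)).getD
        (r, PySem.List.pyGetD p (PySem.Int.mod r (p.length : Int)) 0) 0)).sum
      = pvSum (PySem.List.pyRange 0 40 1)
          (fun r => PySem.List.pyGetD p (PySem.Int.mod r (p.length : Int)) 0)
          (pvKeyed answers 0) := by
    rw [pvSum]
    refine congrArg _ (List.map_congr_left ?_)
    intro r _
    rw [PySem.Dict.getD_counter]
  rw [this, pvSum_keyed p hdvd answers 0]

-- the two selection passes agree on a 3-list of nonnegative scores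
set_option maxHeartbeats 1000000 in
theorem pvSel_eq (s1 s2 s3 : Int) (h1 : 0 ≤ s1) (h2 : 0 ≤ s2) (h3 : 0 ≤ s3) :
    pvSelA (PySem.List.enumerate [s1, s2, s3] 0) 0 [] =
      ((PySem.List.enumerate [s1, s2, s3] 0).filter
          (fun js => js.2 == (PySem.List.max? [s1, s2, s3] (fun s => s)).getD 0)).map
        (fun js => js.1 + 1) := by
  have hm : (PySem.List.max? [s1, s2, s3] (fun s => s)).getD 0
      = if s1 < s2 then (if s2 < s3 then s3 else s2) else (if s1 < s3 then s3 else s1) := by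
    simp only [PySem.List.max?, List.foldl_cons, List.foldl_nil]
    split_ifs <;> simp [*]
  rw [hm]
  simp only [PySem.List.enumerate_cons, PySem.List.enumerate_nil, pvSelA,
    List.filter_cons, List.filter_nil, beq_iff_eq]
  split_ifs <;> first | rfl | omega

-- ===== VERDICT (by name: the statement is the Claim_ definition above) =====
theorem solution_spec : Claim_equal_solution := by
  intro answers _
  unfold Spec_solution solution solution_alt
  have ha : pvExt [1, 2, 3, 4, 5] answers.length = pvExtS pvPa 0 answers.length :=
    pvExt_eq pvPa (by decide) answers.length
  have hb : pvExt [2, 1, 2, 3, 2, 4, 2, 5] answers.length = pvExtS pvPb 0 answers.length :=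
    pvExt_eq pvPb (by decide) answers.length
  have hc : pvExt [3, 3, 1, 1, 2, 2, 4, 4, 5, 5] answers.length = pvExtS pvPc 0 answers.length :=
    pvExt_eq pvPc (by decide) answers.length
  simp only [ha, hb, hc, pvLoopA_eq answers 0 0 0 0, zero_add, List.map_cons, List.map_nil]
  have sa : pvScoreB (pvHistB answers) [1, 2, 3, 4, 5] = pvCnt pvPa 0 answers :=
    pvScoreB_eq answers pvPa (by decide)
  have sb : pvScoreB (pvHistB answers) [2, 1, 2, 3, 2, 4, 2, 5] = pvCnt pvPb 0 answers :=
    pvScoreB_eq answers pvPb (by decide)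
  have sc : pvScoreB (pvHistB answers) [3, 3, 1, 1, 2, 2, 4, 4, 5, 5] = pvCnt pvPc 0 answers :=
    pvScoreB_eq answers pvPc (by decide)
  rw [sa, sb, sc]
  exact pvSel_eq _ _ _ (pvCnt_nonneg pvPa 0 answers) (pvCnt_nonneg pvPb 0 answers)
    (pvCnt_nonneg pvPc 0 answers)
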